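-- pv_equiv track=rewrite | github.com/Saverio976/Chat-App-TUI | module/function/sanitizeStr.py | sanitizeStr
-- ===== SOURCE A (Python) =====
-- def sanitizeStr(data):
--     """
--     Escape all char that will trigger an error.
--
--     Parameters
--     ----------
--     data: str
--         the str to sanitize
--
--     Returns
--     -------
--     str
--         The sanitized data.
--     """
--     data = " ".join(data.split())
--     new_msg = []
--     for letter in data:
--         if letter in ['"',"\\"]:
--             new_msg.append("\\")
--         new_msg.append(letter)
--     return "".join(new_msg)
-- ===== SOURCE B (Python) =====
-- def sanitizeStr(data):
--     data = " ".join(data.split())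
--     return data.replace("\\", "\\\\").replace('"', '\\"')
-- ===== Notes on version B (the rewrite author's own statement) =====
-- stated objective: idiomatic
-- what changed: Replaces the per-character loop that builds a list of escaped characters with two chained whole-string str.replace passes (backslashes doubled first, then quotes escaped), the way an experienced Python developer would write it.
import Mathlib
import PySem

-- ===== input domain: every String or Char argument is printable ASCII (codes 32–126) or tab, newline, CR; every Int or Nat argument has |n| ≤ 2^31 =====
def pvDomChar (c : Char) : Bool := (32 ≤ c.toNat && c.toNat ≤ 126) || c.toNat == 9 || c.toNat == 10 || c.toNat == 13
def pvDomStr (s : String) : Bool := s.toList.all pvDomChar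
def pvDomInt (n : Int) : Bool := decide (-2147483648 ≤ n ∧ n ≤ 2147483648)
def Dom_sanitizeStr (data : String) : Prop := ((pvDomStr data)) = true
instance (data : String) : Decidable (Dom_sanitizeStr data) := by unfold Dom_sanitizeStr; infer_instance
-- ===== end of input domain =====

-- B replaces A's per-character escaping loop with two chained whole-string replace passes
-- (backslashes doubled first, then quotes escaped); same result, idiomatic decomposition.

-- ===== PORT A =====
-- data = " ".join(data.split()); loop over letters appending "\\" before '"' or '\\'
def sanitizeStr (data : String) : String :=
  let d := PySem.Str.join " " ((PySem.Str.split₀ data))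
  let newMsg := d.toList.foldl (fun acc letter =>
    (if letter ∈ ['"', '\\'] then acc ++ ['\\'] else acc) ++ [letter]) []
  String.ofList newMsg

-- ===== PORT B =====
-- data = " ".join(data.split()); data.replace("\\","\\\\").replace('"','\\"')
def sanitizeStr_alt (data : String) : String :=
  let d := PySem.Str.join " " ((PySem.Str.split₀ data))
  PySem.Str.replace (PySem.Str.replace d "\\" "\\\\") "\"" "\\\""

-- ===== PRECONDITION & SPEC =====
def Spec_sanitizeStr (data : String) (out : String) : Prop := out = sanitizeStr_alt data
instance (data : String) (out : String) : Decidable (Spec_sanitizeStr data out) := by unfold Spec_sanitizeStr; infer_instance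

-- ===== CLAIM (what is proved, stated in full; the proofs are below) =====
def Claim_equal_sanitizeStr : Prop := ∀ (data : String), Dom_sanitizeStr data → Spec_sanitizeStr data (sanitizeStr data)

-- ===== LEMMAS AND PROOFS =====

-- replacing a single character o by `new`, character by character
theorem replace_go_single (o : Char) (new : List Char) :
    ∀ (l : List Char) (fuel : Nat) (acc : List Char), l.length ≤ fuel →
      PySem.Chars.replace.go [o] new fuel l acc
        = acc.reverse ++ l.flatMap (fun c => if c = o then new else [c]) := by
  intro l
  induction l with
  | nil =>
      intro fuel acc _
      cases fuel <;> simp [PySem.Chars.replace.go]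
  | cons c t ih =>
      intro fuel acc h
      cases fuel with
      | zero => exact absurd h (by simp)
      | succ n =>
          by_cases hc : c = o
          · subst hc
            have hpre : [c].isPrefixOf (c :: t) = true := by simp [List.isPrefixOf]
            simp only [PySem.Chars.replace.go, hpre, if_true, List.length_cons, List.drop_succ_cons,
              List.length_nil, List.drop_zero]
            rw [ih n _ (by simpa using h)]
            simp
          · have hpre : [o].isPrefixOf (c :: t) = false := by
              simp [List.isPrefixOf]
              exact fun hoc => (hc hoc.symm).elim
            simp only [PySem.Chars.replace.go, hpre, Bool.false_eq_true, if_false]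
            rw [ih n _ (by simpa using h)]
            simp [hc]

theorem replace_single (o : Char) (new cs : List Char) :
    PySem.Chars.replace cs [o] new = cs.flatMap (fun c => if c = o then new else [c]) := by
  rw [PySem.Chars.replace]
  simp only [List.isEmpty_cons, Bool.false_eq_true, if_false]
  rw [replace_go_single o new cs cs.length [] le_rfl]
  simp

-- A's loop as a flatMap
theorem loopA_flatMap (cs : List Char) :
    ∀ acc : List Char,
      cs.foldl (fun acc letter =>
        (if letter ∈ ['"', '\\'] then acc ++ ['\\'] else acc) ++ [letter]) acc
      = acc ++ cs.flatMap (fun c => if c ∈ ['"', '\\'] then ['\\', c] else [c]) := by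
  induction cs with
  | nil => intro acc; simp
  | cons c t ih =>
      intro acc
      simp only [List.foldl_cons, ih, List.flatMap_cons]
      split_ifs <;> simp

theorem sanitize_core (cs : List Char) :
    cs.foldl (fun acc letter =>
        (if letter ∈ ['"', '\\'] then acc ++ ['\\'] else acc) ++ [letter]) []
      = PySem.Chars.replace (PySem.Chars.replace cs ['\\'] ['\\', '\\']) ['"'] ['\\', '"'] := by
  rw [loopA_flatMap cs [], replace_single, replace_single, List.flatMap_assoc]
  simp only [List.nil_append]
  apply List.flatMap_congr
  intro c _
  by_cases h1 : c = '\\'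
  · subst h1; decide
  · by_cases h2 : c = '"'
    · subst h2; decide
    · simp [h1, h2]

-- ===== VERDICT (by name: the statement is the Claim_ definition above) =====
theorem sanitizeStr_spec : Claim_equal_sanitizeStr := by
  intro data _
  unfold Spec_sanitizeStr sanitizeStr sanitizeStr_alt
  apply String.ext
  rw [String.toList_ofList, PySem.Str.toList_replace, PySem.Str.toList_replace]
  exact sanitize_core _
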